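-- pv_equiv track=rewrite | github.com/hannahden/pomadabot | utils.py | get_answer_from_top
-- ===== SOURCE A (Python) =====
-- square = u'\U000025AA'
--
-- krisa = u'\U0001F42D'
--
-- def prettify_rating(mark):
--     string=str(mark)
--     if len(string)==1:
--         return string
--     else:
--         return string[0]+'\\' +string[1:]
--
-- def prettify_name(name):
--     new_name = name.replace('_', '\\_') \
--                    .replace('*', '\\*') \
--                    .replace('[', '\\[') \
--                    .replace(']', '\\]') \
--                    .replace('(', '\\(') \
--                    .replace(')', '\\)') \
--                    .replace('-', '\\-') \
--                    .replace('|', '\\|') \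
--                    .replace('.', '\\.') \
--                    .replace('!', '\\!') \
--                    .replace('`', '\\`') \
--                    .replace('~', '\\~') \
--                    .replace('>', '\\>') \
--                    .replace('#', '\\#') \
--                    .replace('+', '\\+') \
--                    .replace('=', '\\=') \
--                    .replace('{', '\\{') \
--                    .replace('}', '\\}')
--
--
--     return new_name
--
-- def get_answer_from_top(top):
--     start = 'Вот что я нашел\: \n \n'
--     irec_str = 'https://irecommend\.ru'
--     hyperlink_template = ' [тык]({})'
--
--     for item in top:
--         start += ''.join([prettify_name(item[0]), '\:', hyperlink_template.format(irec_str+item[1]), '\n'])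
--         start += ''.join([square, ' ', 'Отзывов\: {}\n'.format(item[2]), square, ' ', 'Средняя оценка\: {}\n \n'.format(prettify_rating(item[3]))])
--
--     start += 'Обращайся\!' + krisa
--     return start
-- ===== SOURCE B (Python) =====
-- square = u'\U000025AA'
-- krisa = u'\U0001F42D'
--
-- _SPECIALS = set('_*[]()-|.!`~>#+={}')
--
-- def _escape(name):
--     # one pass over the characters instead of 18 whole-string scans
--     return ''.join('\\' + c if c in _SPECIALS else c for c in name)
--
-- def _rating(mark):
--     s = str(mark)
--     return s if len(s) == 1 else s[0] + '\\' + s[1:]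
--
-- def _block(name, link, reviews, mark):
--     return (_escape(name) + '\\: [тык](https://irecommend\\.ru' + link + ')\n'
--             + square + ' Отзывов\\: ' + str(reviews) + '\n'
--             + square + ' Средняя оценка\\: ' + _rating(mark) + '\n \n')
--
-- def get_answer_from_top(top):
--     # build the message back-to-front: start from the footer and prepend blocks
--     msg = 'Обращайся\\!' + krisa
--     for item in reversed(top):
--         msg = _block(*item) + msg
--     return 'Вот что я нашел\\: \n \n' + msg
-- ===== Notes on version B (the rewrite author's own statement) =====
-- stated objective: alternative
-- what changed: B builds the message back-to-front (starting from the footer and prepending one per-item block while walking the list reversed) instead of A's forward += accumulation, and escapes names in a single per-character pass instead of A's 18 sequential whole-string .replace scans.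
import Mathlib
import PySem

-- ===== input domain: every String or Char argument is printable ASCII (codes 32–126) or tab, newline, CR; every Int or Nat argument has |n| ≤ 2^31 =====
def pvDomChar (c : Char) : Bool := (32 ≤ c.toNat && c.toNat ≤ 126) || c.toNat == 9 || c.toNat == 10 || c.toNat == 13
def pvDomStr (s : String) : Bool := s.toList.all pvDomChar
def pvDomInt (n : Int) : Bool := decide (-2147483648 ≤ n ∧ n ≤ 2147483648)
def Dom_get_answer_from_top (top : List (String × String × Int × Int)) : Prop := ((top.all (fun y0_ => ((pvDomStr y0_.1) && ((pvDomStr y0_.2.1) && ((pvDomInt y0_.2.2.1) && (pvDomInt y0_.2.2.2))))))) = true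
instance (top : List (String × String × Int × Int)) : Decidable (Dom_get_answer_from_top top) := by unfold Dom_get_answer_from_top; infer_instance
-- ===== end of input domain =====

-- B builds the message back-to-front (prepending per-item blocks onto the footer
-- while walking the list reversed) and escapes names in one per-character pass
-- instead of A's forward += accumulation with 18 sequential .replace scans
-- (objective: alternative; same result on every input).

-- ===== PORT A =====
def pvSquare : String := "▪"
def pvKrisa : String := "🐭"

def prettify_rating (mark : Int) : String :=
  let string := PySem.Int.toStr mark
  if PySem.Str.len string = 1 then string
  else
    -- string[0]: str(mark) is never empty, so the IndexError branch is unreachable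
    match PySem.Str.pyGet? string 0 with
    | some c => String.ofList [c] ++ "\\" ++ PySem.Str.slice string (some 1) none
    | none => ""

def prettify_name (name : String) : String :=
  let n1 := PySem.Str.replace name "_" "\\_"
  let n2 := PySem.Str.replace n1 "*" "\\*"
  let n3 := PySem.Str.replace n2 "[" "\\["
  let n4 := PySem.Str.replace n3 "]" "\\]"
  let n5 := PySem.Str.replace n4 "(" "\\("
  let n6 := PySem.Str.replace n5 ")" "\\)"
  let n7 := PySem.Str.replace n6 "-" "\\-"
  let n8 := PySem.Str.replace n7 "|" "\\|"
  let n9 := PySem.Str.replace n8 "." "\\."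
  let n10 := PySem.Str.replace n9 "!" "\\!"
  let n11 := PySem.Str.replace n10 "`" "\\`"
  let n12 := PySem.Str.replace n11 "~" "\\~"
  let n13 := PySem.Str.replace n12 ">" "\\>"
  let n14 := PySem.Str.replace n13 "#" "\\#"
  let n15 := PySem.Str.replace n14 "+" "\\+"
  let n16 := PySem.Str.replace n15 "=" "\\="
  let n17 := PySem.Str.replace n16 "{" "\\{"
  let n18 := PySem.Str.replace n17 "}" "\\}"
  n18

def get_answer_from_top (top : List (String × String × Int × Int)) : String :=
  let start := "Вот что я нашел\\: \n \n"
  let irec_str := "https://irecommend\\.ru"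
  let start := top.foldl (fun start item =>
    let start := start ++ PySem.Str.join "" [prettify_name item.1, "\\:", " [тык](" ++ (irec_str ++ item.2.1) ++ ")", "\n"]
    start ++ PySem.Str.join "" [pvSquare, " ", "Отзывов\\: " ++ PySem.Int.toStr item.2.2.1 ++ "\n", pvSquare, " ", "Средняя оценка\\: " ++ prettify_rating item.2.2.2 ++ "\n \n"]) start
  start ++ "Обращайся\\!" ++ pvKrisa

-- ===== PORT B =====
def pvSpecials : List Char := "_*[]()-|.!`~>#+={}".toList

-- _escape: one pass over the characters; ''.join of the per-char pieces
def pyEscape (name : String) : String :=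
  String.ofList (name.toList.flatMap (fun c => if pvSpecials.contains c then ['\\', c] else [c]))

def pvRating (mark : Int) : String :=
  let s := PySem.Int.toStr mark
  if PySem.Str.len s = 1 then s
  else
    match PySem.Str.pyGet? s 0 with
    | some c => String.ofList [c] ++ "\\" ++ PySem.Str.slice s (some 1) none
    | none => ""

def pvBlock (item : String × String × Int × Int) : String :=
  pyEscape item.1 ++ "\\: [тык](https://irecommend\\.ru" ++ item.2.1 ++ ")\n"
    ++ pvSquare ++ " Отзывов\\: " ++ PySem.Int.toStr item.2.2.1 ++ "\n"
    ++ pvSquare ++ " Средняя оценка\\: " ++ pvRating item.2.2.2 ++ "\n \n"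

def get_answer_from_top_alt (top : List (String × String × Int × Int)) : String :=
  let msg := "Обращайся\\!" ++ pvKrisa
  let msg := top.reverse.foldl (fun msg item => pvBlock item ++ msg) msg
  "Вот что я нашел\\: \n \n" ++ msg

-- ===== PRECONDITION & SPEC =====
def Spec_get_answer_from_top (top : List (String × String × Int × Int)) (out : String) : Prop := out = get_answer_from_top_alt top
instance (top : List (String × String × Int × Int)) (out : String) : Decidable (Spec_get_answer_from_top top out) := by unfold Spec_get_answer_from_top; infer_instance

-- ===== CLAIM (what is proved, stated in full; the proofs are below) =====
def Claim_equal_get_answer_from_top : Prop := ∀ (top : List (String × String × Int × Int)), Dom_get_answer_from_top top → Spec_get_answer_from_top top (get_answer_from_top top)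

-- ===== LEMMAS AND PROOFS =====

theorem rep_go (c : Char) (new : List Char) : ∀ (l : List Char) (fuel : Nat) (acc : List Char), l.length ≤ fuel →
    PySem.Chars.replace.go [c] new fuel l acc = acc.reverse ++ l.flatMap (fun x => if x = c then new else [x])
  | [], 0, acc, _ => by simp [PySem.Chars.replace.go]
  | [], fuel+1, acc, _ => by simp [PySem.Chars.replace.go]
  | x :: t, fuel+1, acc, h => by
    rw [PySem.Chars.replace.go]
    have hpre : ([c].isPrefixOf (x :: t)) = (x == c) := by
      simp [List.isPrefixOf, BEq.comm]
    rw [hpre]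
    by_cases hx : x = c
    · simp only [hx, BEq.rfl, if_true, List.length_cons, List.length_nil, List.drop_succ_cons,
        List.drop_zero]
      rw [rep_go c new t fuel (new.reverse ++ acc) (by simpa using h)]
      simp
    · have : (x == c) = false := by simp [hx]
      rw [this]
      simp only [Bool.false_eq_true, if_false]
      rw [rep_go c new t fuel (x :: acc) (by simpa using h)]
      simp [hx]

theorem replace_single (s : List Char) (c : Char) (new : List Char) :
    PySem.Chars.replace s [c] new = s.flatMap (fun x => if x = c then new else [x]) := by
  rw [PySem.Chars.replace]
  simp only [List.isEmpty_cons, Bool.false_eq_true, if_false]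
  exact rep_go c new s s.length [] le_rfl

def escapeAll (cs : List Char) (s : List Char) : List Char :=
  s.flatMap (fun x => if x ∈ cs then ['\\', x] else [x])

theorem chain_step (c : Char) (cs : List Char) (s : List Char)
    (hb : ('\\' : Char) ∉ c :: cs) (hnd : (c :: cs).Nodup) :
    escapeAll cs (s.flatMap (fun x => if x = c then ['\\', c] else [x])) = escapeAll (c :: cs) s := by
  unfold escapeAll
  induction s with
  | nil => simp
  | cons x t ih =>
    simp only [List.flatMap_cons, List.flatMap_append, ih]
    congr 1
    by_cases hx : x = c
    · subst hx
      have h1 : x ∉ cs := (List.nodup_cons.mp hnd).1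
      have h2 : ('\\' : Char) ∉ cs := fun h => hb (List.mem_cons_of_mem _ h)
      simp [h1, h2]
    · by_cases hm : x ∈ cs <;> simp [hx, hm]

theorem escapeAll_nil (t : List Char) : escapeAll [] t = t := by simp [escapeAll]

theorem name_eq (name : String) : prettify_name name = pyEscape name := by
  apply String.toList_inj.mp
  simp only [prettify_name, pyEscape, PySem.Str.toList_replace, String.toList_ofList]
  simp only [String.reduceToList]
  simp only [replace_single]
  refine Eq.trans (escapeAll_nil _).symm ?_
  rw [chain_step '}' [] _ (by decide) (by decide)]
  rw [chain_step '{' ['}'] _ (by decide) (by decide)]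
  rw [chain_step '=' ['{', '}'] _ (by decide) (by decide)]
  rw [chain_step '+' ['=', '{', '}'] _ (by decide) (by decide)]
  rw [chain_step '#' ['+', '=', '{', '}'] _ (by decide) (by decide)]
  rw [chain_step '>' ['#', '+', '=', '{', '}'] _ (by decide) (by decide)]
  rw [chain_step '~' ['>', '#', '+', '=', '{', '}'] _ (by decide) (by decide)]
  rw [chain_step '`' ['~', '>', '#', '+', '=', '{', '}'] _ (by decide) (by decide)]
  rw [chain_step '!' ['`', '~', '>', '#', '+', '=', '{', '}'] _ (by decide) (by decide)]
  rw [chain_step '.' ['!', '`', '~', '>', '#', '+', '=', '{', '}'] _ (by decide) (by decide)]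
  rw [chain_step '|' ['.', '!', '`', '~', '>', '#', '+', '=', '{', '}'] _ (by decide) (by decide)]
  rw [chain_step '-' ['|', '.', '!', '`', '~', '>', '#', '+', '=', '{', '}'] _ (by decide) (by decide)]
  rw [chain_step ')' ['-', '|', '.', '!', '`', '~', '>', '#', '+', '=', '{', '}'] _ (by decide) (by decide)]
  rw [chain_step '(' [')', '-', '|', '.', '!', '`', '~', '>', '#', '+', '=', '{', '}'] _ (by decide) (by decide)]
  rw [chain_step ']' ['(', ')', '-', '|', '.', '!', '`', '~', '>', '#', '+', '=', '{', '}'] _ (by decide) (by decide)]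
  rw [chain_step '[' [']', '(', ')', '-', '|', '.', '!', '`', '~', '>', '#', '+', '=', '{', '}'] _ (by decide) (by decide)]
  rw [chain_step '*' ['[', ']', '(', ')', '-', '|', '.', '!', '`', '~', '>', '#', '+', '=', '{', '}'] _ (by decide) (by decide)]
  rw [chain_step '_' ['*', '[', ']', '(', ')', '-', '|', '.', '!', '`', '~', '>', '#', '+', '=', '{', '}'] _ (by decide) (by decide)]
  simp [escapeAll, pvSpecials, List.contains_eq_mem]

theorem block_eq (item : String × String × Int × Int) (s : String) :
    (s ++ PySem.Str.join "" [prettify_name item.1, "\\:", " [тык](" ++ ("https://irecommend\\.ru" ++ item.2.1) ++ ")", "\n"])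
      ++ PySem.Str.join "" [pvSquare, " ", "Отзывов\\: " ++ PySem.Int.toStr item.2.2.1 ++ "\n", pvSquare, " ",
           "Средняя оценка\\: " ++ prettify_rating item.2.2.2 ++ "\n \n"]
      = s ++ pvBlock item := by
  have hr : prettify_rating item.2.2.2 = pvRating item.2.2.2 := rfl
  apply String.toList_inj.mp
  simp [PySem.Str.toList_join, PySem.Chars.join_cons_cons, PySem.Chars.join_singleton,
    pvBlock, name_eq, hr]

theorem fold_eq (top : List (String × String × Int × Int)) :
    ∀ (s : String),
    (top.foldl (fun start item =>
      let start := start ++ PySem.Str.join "" [prettify_name item.1, "\\:", " [тык](" ++ ("https://irecommend\\.ru" ++ item.2.1) ++ ")", "\n"]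
      start ++ PySem.Str.join "" [pvSquare, " ", "Отзывов\\: " ++ PySem.Int.toStr item.2.2.1 ++ "\n", pvSquare, " ", "Средняя оценка\\: " ++ prettify_rating item.2.2.2 ++ "\n \n"]) s)
      ++ "Обращайся\\!" ++ pvKrisa
    = s ++ top.foldr (fun item msg => pvBlock item ++ msg) ("Обращайся\\!" ++ pvKrisa) := by
  induction top with
  | nil => intro s; simp [String.append_assoc]
  | cons item rest ih =>
    intro s
    simp only [List.foldl_cons, List.foldr_cons]
    rw [ih]
    rw [block_eq]
    simp [String.append_assoc]

theorem ab_eq (top : List (String × String × Int × Int)) :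
    get_answer_from_top top = get_answer_from_top_alt top := by
  unfold get_answer_from_top get_answer_from_top_alt
  dsimp only
  rw [List.foldl_reverse]
  exact fold_eq top _

-- ===== VERDICT (by name: the statement is the Claim_ definition above) =====
theorem get_answer_from_top_spec : Claim_equal_get_answer_from_top := by
  intro top _
  show get_answer_from_top top = get_answer_from_top_alt top
  exact ab_eq top
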